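-- pv_equiv track=rewrite | github.com/iwi/advent_calendar | day_20171216.py | get_partner_positions
-- ===== SOURCE A (Python) =====
-- def get_partner_positions(group, p_move):
--     to_x = p_move.split('/')
--     positions = []
--     for index, element in enumerate(group):
--         if element == to_x[0]:
--             positions.append(index)
--             break
--
--     for index, element in enumerate(group):
--         if element == to_x[1]:
--             positions.append(index)
--             break
--
--     return positions
-- ===== SOURCE B (Python) =====
-- def get_partner_positions(group, p_move):
--     to_x = p_move.split('/')
--     pos0 = None
--     pos1 = None
--     for index, element in enumerate(group):
--         if pos0 is None and element == to_x[0]: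
--             pos0 = index
--         if pos1 is None and element == to_x[1]:
--             pos1 = index
--         if pos0 is not None and pos1 is not None:
--             break
--     positions = []
--     if pos0 is not None:
--         positions.append(pos0)
--     if pos1 is not None:
--         positions.append(pos1)
--     return positions
-- ===== Notes on version B (the rewrite author's own statement) =====
-- stated objective: alternative
-- what changed: Replaces A's two sequential enumerate-scans of the list with one combined pass that tracks both first-occurrence indices in two Optional variables and stops as soon as both are found, then assembles the result from the two options.
import Mathlib
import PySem

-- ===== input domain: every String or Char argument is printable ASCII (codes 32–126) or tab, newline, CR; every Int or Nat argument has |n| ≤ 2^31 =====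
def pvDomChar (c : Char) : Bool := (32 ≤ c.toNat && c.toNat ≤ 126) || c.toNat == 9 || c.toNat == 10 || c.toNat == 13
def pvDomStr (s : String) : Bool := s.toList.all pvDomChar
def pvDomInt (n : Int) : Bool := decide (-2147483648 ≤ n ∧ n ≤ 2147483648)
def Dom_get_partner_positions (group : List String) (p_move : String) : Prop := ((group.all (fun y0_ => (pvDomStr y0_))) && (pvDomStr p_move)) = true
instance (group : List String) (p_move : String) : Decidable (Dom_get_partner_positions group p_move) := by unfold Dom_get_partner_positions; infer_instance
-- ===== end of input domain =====

-- B does one combined scan with two Option accumulators instead of A's two separate scans (alternative decomposition, same cost).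
-- ===== PORT A =====
-- A's "for index, element in enumerate(group): if element == t: append index; break"
def pvLoopA (l : List String) (t : String) (i : Int) : Option Int :=
  match l with
  | [] => none
  | e :: rest => if e = t then some i else pvLoopA rest t (i + 1)

def get_partner_positions (group : List String) (p_move : String) : List Int :=
  let to_x := (PySem.Str.split? p_move "/").getD []
  -- to_x[0]/to_x[1] (in-range on Pre_; to_x is never empty so index 0 is always fine)
  let positions :=
    match pvLoopA group (to_x.getD 0 "") 0 with
    | some i => [i]
    | none => []
  let positions :=
    positions ++
      match pvLoopA group (to_x.getD 1 "") 0 with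
      | some i => [i]
      | none => []
  positions

-- ===== PORT B =====
-- B's single loop body: update pos0/pos1 only while still none, break when both set
def pvScanB (l : List String) (t0 t1 : String) (i : Int) (p0 p1 : Option Int) :
    Option Int × Option Int :=
  match l with
  | [] => (p0, p1)
  | e :: rest =>
    let p0' := if p0 = none ∧ e = t0 then some i else p0
    let p1' := if p1 = none ∧ e = t1 then some i else p1
    if p0'.isSome ∧ p1'.isSome then (p0', p1')
    else pvScanB rest t0 t1 (i + 1) p0' p1'

def get_partner_positions_alt (group : List String) (p_move : String) : List Int :=
  let to_x := (PySem.Str.split? p_move "/").getD []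
  let st := pvScanB group (to_x.getD 0 "") (to_x.getD 1 "") 0 none none
  (match st.1 with | some a => [a] | none => []) ++
  (match st.2 with | some b => [b] | none => [])

-- ===== PRECONDITION & SPEC =====
-- Pre_ excludes exactly the inputs where Python A raises IndexError: a nonempty group with no '/'
-- in p_move (to_x[1] is evaluated only when the loop body runs).
def Pre_get_partner_positions (group : List String) (p_move : String) : Prop :=
  group = [] ∨ 2 ≤ ((PySem.Str.split? p_move "/").getD []).length
instance (group : List String) (p_move : String) : Decidable (Pre_get_partner_positions group p_move) := by unfold Pre_get_partner_positions; infer_instance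

def pvWitness_get_partner_positions : List String × String := (["a", "b"], "b/a")

def Spec_get_partner_positions (group : List String) (p_move : String) (out : List Int) : Prop := out = get_partner_positions_alt group p_move
instance (group : List String) (p_move : String) (out : List Int) : Decidable (Spec_get_partner_positions group p_move out) := by unfold Spec_get_partner_positions; infer_instance

-- ===== CLAIM (what is proved, stated in full; the proofs are below) =====
def Claim_equal_get_partner_positions : Prop := ∀ (group : List String) (p_move : String), Dom_get_partner_positions group p_move → Pre_get_partner_positions group p_move → Spec_get_partner_positions group p_move (get_partner_positions group p_move)

-- ===== LEMMAS AND PROOFS =====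
-- B's fused scan computes exactly the pair of A's two independent first-occurrence searches,
-- each seeded with whatever the accumulator already holds.
theorem pvScanB_eq (l : List String) (t0 t1 : String) :
    ∀ (i : Int) (p0 p1 : Option Int),
      pvScanB l t0 t1 i p0 p1 =
        ((match p0 with | some a => some a | none => pvLoopA l t0 i),
         (match p1 with | some b => some b | none => pvLoopA l t1 i)) := by
  induction l with
  | nil => intro i p0 p1; cases p0 <;> cases p1 <;> simp [pvScanB, pvLoopA]
  | cons e rest ih =>
    intro i p0 p1
    cases p0 <;> cases p1 <;>
      simp only [pvScanB, pvLoopA] <;>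
      split_ifs <;>
      simp_all

theorem get_partner_positions_spec : Claim_equal_get_partner_positions := by
  intro group p_move _ _
  unfold Spec_get_partner_positions get_partner_positions get_partner_positions_alt
  simp [pvScanB_eq]
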